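-- pv_equiv track=rewrite | github.com/oloapinivad/ECmean4 | ecmean/libs/general.py | runtime_weights
-- ===== SOURCE A (Python) =====
-- def runtime_weights(varlist):
--     """
--     Define the weights to estimate the best repartition of the cores
--     This is done a-priori, considering that
--     1) compound variables are more difficult to compute
--     2) 3d variables requires more evaluation
--     """
--
--     w = {}
--     for k in varlist:
--         if k in ['ua', 'ta', 'va', 'hus']:
--             t = 8
--         elif k in ['pme', 'net_sfc_nosn', 'net_sfc', 'toamsfc_nosn', 'toamsfc',
--                    'pr_oce', 'pme_oce', 'pr_land', 'pme_land', 'net_toa']: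
--             t = 3
--         else:
--             t = 1
--         w[k] = t
--
--     return w
-- ===== SOURCE B (Python) =====
-- _W3 = ['pme', 'net_sfc_nosn', 'net_sfc', 'toamsfc_nosn', 'toamsfc',
--        'pr_oce', 'pme_oce', 'pr_land', 'pme_land', 'net_toa']
-- _W8 = ['ua', 'ta', 'va', 'hus']
--
--
-- def runtime_weights(varlist):
--     """Staged passes: default every variable to 1, then loop over the two
--     constant name lists and overwrite the weight of those actually present."""
--     w = {k: 1 for k in varlist}
--     for name in _W3:
--         if name in w:
--             w[name] = 3
--     for name in _W8:
--         if name in w: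
--             w[name] = 8
--     return w
-- ===== Notes on version B (the rewrite author's own statement) =====
-- stated objective: alternative
-- what changed: Instead of classifying each input element with an if/elif membership chain, B inverts the iteration: it defaults every variable to 1 in one pass, then loops over the two constant weight lists and overwrites the entries actually present (dict overwrite keeps position, so order is preserved).
import Mathlib
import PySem

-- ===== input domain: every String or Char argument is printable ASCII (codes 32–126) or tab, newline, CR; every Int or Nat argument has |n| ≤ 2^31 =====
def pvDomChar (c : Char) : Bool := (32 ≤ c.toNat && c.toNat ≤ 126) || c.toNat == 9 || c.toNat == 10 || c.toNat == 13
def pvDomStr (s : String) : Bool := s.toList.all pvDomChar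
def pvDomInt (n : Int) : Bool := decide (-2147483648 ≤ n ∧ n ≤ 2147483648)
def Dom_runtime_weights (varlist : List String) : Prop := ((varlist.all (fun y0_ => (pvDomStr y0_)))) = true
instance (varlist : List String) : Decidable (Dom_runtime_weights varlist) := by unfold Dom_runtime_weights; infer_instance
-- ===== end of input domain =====

-- B inverts A's iteration: instead of an if/elif membership chain per element, it defaults
-- every variable to 1 and then loops over the two constant weight lists, overwriting the
-- entries actually present (objective: alternative; same result, order preserved by overwrite).

-- ===== PORT A =====
def runtime_weights (varlist : List String) : List (String × Int) :=
  (varlist.foldl (fun w k =>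
      let t : Int :=
        if (["ua", "ta", "va", "hus"]).contains k then 8
        else if (["pme", "net_sfc_nosn", "net_sfc", "toamsfc_nosn", "toamsfc",
                  "pr_oce", "pme_oce", "pr_land", "pme_land", "net_toa"]).contains k then 3
        else 1
      w.insert k t) (PySem.Dict.empty : PySem.Dict String Int)).items

-- ===== PORT B =====
def rwW3 : List String := ["pme", "net_sfc_nosn", "net_sfc", "toamsfc_nosn", "toamsfc",
                           "pr_oce", "pme_oce", "pr_land", "pme_land", "net_toa"]
def rwW8 : List String := ["ua", "ta", "va", "hus"]

def runtime_weights_alt (varlist : List String) : List (String × Int) :=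
  let w0 := varlist.foldl (fun w k => w.insert k (1 : Int)) (PySem.Dict.empty : PySem.Dict String Int)
  let w3 := rwW3.foldl (fun w name => if w.contains name then w.insert name 3 else w) w0
  let w8 := rwW8.foldl (fun w name => if w.contains name then w.insert name 8 else w) w3
  w8.items

-- ===== PRECONDITION & SPEC =====
def Spec_runtime_weights (varlist : List String) (out : List (String × Int)) : Prop := out = runtime_weights_alt varlist
instance (varlist : List String) (out : List (String × Int)) : Decidable (Spec_runtime_weights varlist out) := by unfold Spec_runtime_weights; infer_instance

-- ===== CLAIM (what is proved, stated in full; the proofs are below) =====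
def Claim_equal_runtime_weights : Prop := ∀ (varlist : List String), Dom_runtime_weights varlist → Spec_runtime_weights varlist (runtime_weights varlist)

-- ===== LEMMAS AND PROOFS =====

-- get? through a key-driven insert fold (value depends only on the key)
theorem rw_get?_foldl_insert (fA : String → Int) (l : List String)
    (d : PySem.Dict String Int) (x : String) :
    (l.foldl (fun w k => w.insert k (fA k)) d).get? x
      = if x ∈ l then some (fA x) else d.get? x := by
  induction l generalizing d with
  | nil => simp
  | cons h t ih =>
    simp only [List.foldl_cons, ih, PySem.Dict.get?_insert, List.mem_cons]
    by_cases h1 : x ∈ t <;> by_cases h2 : x = h <;> simp [h1, h2]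

-- a conditional-overwrite pass does not change the key list
theorem rw_keys_pass (v : Int) (l : List String) (d : PySem.Dict String Int) :
    (l.foldl (fun w n => if w.contains n then w.insert n v else w) d).keys = d.keys := by
  induction l generalizing d with
  | nil => rfl
  | cons n t ih =>
    simp only [List.foldl_cons]
    by_cases hc : d.contains n = true
    · rw [if_pos hc, ih, PySem.Dict.keys_insert_of_contains _ _ hc]
    · rw [if_neg hc, ih]

theorem rw_contains_pass (v : Int) (l : List String) (d : PySem.Dict String Int) (x : String) :
    (l.foldl (fun w n => if w.contains n then w.insert n v else w) d).contains x = d.contains x := by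
  rw [PySem.Dict.contains_eq_decide_mem_keys, PySem.Dict.contains_eq_decide_mem_keys, rw_keys_pass]

-- get? through a conditional-overwrite pass
theorem rw_get?_pass (v : Int) (l : List String) (d : PySem.Dict String Int) (x : String) :
    (l.foldl (fun w n => if w.contains n then w.insert n v else w) d).get? x
      = if x ∈ l ∧ d.contains x = true then some v else d.get? x := by
  induction l generalizing d with
  | nil => simp
  | cons n t ih =>
    simp only [List.foldl_cons]
    by_cases hc : d.contains n = true
    · rw [if_pos hc]
      by_cases h2 : x = n
      · subst h2
        rw [ih]
        simp [PySem.Dict.get?_insert_self, PySem.Dict.contains_insert_self, hc]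
      · rw [ih]
        simp [h2, PySem.Dict.contains_insert, PySem.Dict.get?_insert_of_ne _ _ h2]
    · rw [if_neg hc]
      by_cases h2 : x = n
      · subst h2; rw [ih]; simp [hc]
      · rw [ih]; simp [h2]

-- the per-element branch value A computes
def rwFA (k : String) : Int :=
  if rwW8.contains k then 8 else if rwW3.contains k then 3 else 1

-- pointwise agreement of the two final dicts
theorem rw_get?_agree (varlist : List String) (x : String) :
    ((rwW8.foldl (fun w name => if w.contains name then w.insert name (8 : Int) else w)
       (rwW3.foldl (fun w name => if w.contains name then w.insert name (3 : Int) else w)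
         (varlist.foldl (fun w k => w.insert k (1 : Int))
           (PySem.Dict.empty : PySem.Dict String Int))))).get? x
      = (varlist.foldl (fun w k => w.insert k (rwFA k))
           (PySem.Dict.empty : PySem.Dict String Int)).get? x := by
  have h0 : (varlist.foldl (fun w k => w.insert k (1 : Int))
      (PySem.Dict.empty : PySem.Dict String Int)).get? x
      = if x ∈ varlist then some 1 else none := by
    rw [rw_get?_foldl_insert (fun _ => (1 : Int))]; simp
  have hc0 : (varlist.foldl (fun w k => w.insert k (1 : Int))
      (PySem.Dict.empty : PySem.Dict String Int)).contains x
      = decide (x ∈ varlist) := by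
    rw [PySem.Dict.contains_eq_isSome_get?, h0]
    by_cases hx : x ∈ varlist <;> simp [hx]
  rw [rw_get?_pass, rw_contains_pass, rw_get?_pass, hc0, h0,
      rw_get?_foldl_insert rwFA]
  by_cases hx : x ∈ varlist
  · by_cases h8 : x ∈ rwW8 <;> by_cases h3 : x ∈ rwW3 <;>
      simp [hx, rwFA, rwW8, rwW3] <;> simp_all [rwW8, rwW3]
  · simp [hx]

theorem rw_keys_agree (varlist : List String) :
    ((rwW8.foldl (fun w name => if w.contains name then w.insert name (8 : Int) else w)
       (rwW3.foldl (fun w name => if w.contains name then w.insert name (3 : Int) else w)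
         (varlist.foldl (fun w k => w.insert k (1 : Int))
           (PySem.Dict.empty : PySem.Dict String Int))))).keys
      = (varlist.foldl (fun w k => w.insert k (rwFA k))
           (PySem.Dict.empty : PySem.Dict String Int)).keys := by
  rw [rw_keys_pass, rw_keys_pass,
      PySem.Dict.keys_foldl_insert, PySem.Dict.keys_foldl_insert]

-- ===== VERDICT (by name: the statement is the Claim_ definition above) =====
theorem runtime_weights_spec : Claim_equal_runtime_weights := by
  intro varlist _
  unfold Spec_runtime_weights runtime_weights runtime_weights_alt
  show (varlist.foldl (fun w k => w.insert k (rwFA k)) (PySem.Dict.empty : PySem.Dict String Int)).items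
      = (rwW8.foldl (fun w name => if w.contains name then w.insert name (8 : Int) else w)
          (rwW3.foldl (fun w name => if w.contains name then w.insert name (3 : Int) else w)
            (varlist.foldl (fun w k => w.insert k (1 : Int)) (PySem.Dict.empty : PySem.Dict String Int)))).items
  have hnodA : (varlist.foldl (fun w k => w.insert k (rwFA k))
      (PySem.Dict.empty : PySem.Dict String Int)).keys.Nodup :=
    PySem.Dict.nodup_keys_foldl_insert _ _ _ PySem.Dict.nodup_keys_empty
  have hnodB : ((rwW8.foldl (fun w name => if w.contains name then w.insert name (8 : Int) else w)
      (rwW3.foldl (fun w name => if w.contains name then w.insert name (3 : Int) else w)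
        (varlist.foldl (fun w k => w.insert k (1 : Int))
          (PySem.Dict.empty : PySem.Dict String Int))))).keys.Nodup := by
    rw [rw_keys_pass, rw_keys_pass]
    exact PySem.Dict.nodup_keys_foldl_insert _ _ _ PySem.Dict.nodup_keys_empty
  rw [PySem.Dict.items_eq_map_keys _ hnodA 0, PySem.Dict.items_eq_map_keys _ hnodB 0, rw_keys_agree]
  apply List.map_congr_left
  intro k _
  have h := rw_get?_agree varlist k
  simp [PySem.Dict.getD_eq_get?_getD, h]
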